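-- pv_equiv track=rewrite | github.com/wzygxr/shuati | class058_BitsetAndBitManipulation/Code11_MaxLength.py | max_length3
-- ===== SOURCE A (Python) =====
-- def max_length3(arr):
--     """
--     使用优化的回溯算法和位运算求解串联字符串的最大长度
--     通过预计算长度和剪枝优化性能
--
--     Args:
--         arr: 字符串列表
--
--     Returns:
--         满足条件的最长字符串长度
--
--     时间复杂度: O(2^n)，但通过剪枝优化实际运行时间
--     空间复杂度: O(n)
--     """
--     # 过滤无效字符串并转换为掩码
--     masks = []
--     lengths = []
--     for s in arr:
--         mask = 0
--         valid = True
--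
--         for c in s:
--             bit = 1 << (ord(c) - ord('a'))
--             if mask & bit:
--                 valid = False
--                 break
--             mask |= bit
--
--         if valid:
--             masks.append(mask)
--             lengths.append(bin(mask).count('1'))
--
--     # 全局变量，用于存储最大长度
--     max_len = [0]
--
--     def optimized_backtrack(index, current_mask, current_length):
--         """
--         优化的回溯函数，包含剪枝
--
--         Args:
--             index: 当前处理到的字符串索引
--             current_mask: 当前已选字符串的位掩码
--             current_length: 当前已选字符串的总长度
--         """
--         # 更新最大长度
--         if current_length > max_len[0]:
--             max_len[0] = current_length
--
--         # 剪枝：如果剩余的字符串即使全部选上也无法超过当前最大长度，提前返回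
--         remaining_max_length = current_length
--         for i in range(index, len(masks)):
--             if (current_mask & masks[i]) == 0:
--                 remaining_max_length += lengths[i]
--
--         if remaining_max_length <= max_len[0]:
--             return  # 剪枝
--
--         # 回溯
--         for i in range(index, len(masks)):
--             if (current_mask & masks[i]) == 0:  # 没有共同的字符
--                 optimized_backtrack(i + 1,
--                                    current_mask | masks[i],
--                                    current_length + lengths[i])
--
--     # 调用优化的回溯函数
--     optimized_backtrack(0, 0, 0)
--     return max_len[0]
-- ===== SOURCE B (Python) =====
-- def max_length3(arr):
--     reach = {0}
--     for s in arr: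
--         m = 0
--         for c in s:
--             m |= 1 << (ord(c) - 97)
--         if bin(m).count("1") != len(s):
--             continue
--         reach |= {r | m for r in reach if r & m == 0}
--     return max(bin(r).count("1") for r in reach)
-- ===== Notes on version B (the rewrite author's own statement) =====
-- stated objective: faster
-- what changed: A's exponential pruned backtracking over index/mask/length (with a mutable global maximum) is replaced by a one-pass DP that folds the strings into the deduplicated set of reachable union bitmasks and returns the maximum popcount of that set.
-- outside the precondition, e.g. on max_length3(['aaB']): A returns 0, B raises ValueError
import Mathlib
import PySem

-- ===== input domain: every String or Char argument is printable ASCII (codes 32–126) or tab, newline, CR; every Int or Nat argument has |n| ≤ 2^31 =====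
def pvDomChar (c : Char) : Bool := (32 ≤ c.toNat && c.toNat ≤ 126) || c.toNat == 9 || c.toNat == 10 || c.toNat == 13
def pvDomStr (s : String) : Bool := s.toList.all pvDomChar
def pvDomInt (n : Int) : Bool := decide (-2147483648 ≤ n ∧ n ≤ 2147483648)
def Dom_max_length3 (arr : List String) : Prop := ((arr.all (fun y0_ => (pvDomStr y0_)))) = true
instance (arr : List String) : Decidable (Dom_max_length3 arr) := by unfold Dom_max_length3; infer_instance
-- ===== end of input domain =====

-- B replaces A's exponential pruned backtracking by a DP over the set of reachable character-bitmasks; a timing run decides the speed label.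

-- ===== PORT A =====

-- bin(x).count('1') on a nonnegative mask = x.bit_count(); PySem.Int.bitCount is the prelude's popcount primitive
def pvPc (n : Nat) : Nat := PySem.Int.bitCount (n : Int)

-- A's per-string loop: build the mask char by char, break (none = invalid) on a repeated bit.
-- 'ord(c) - ord('a')' is ported with Nat subtraction; Pre_ keeps every char ≥ 'a' (below, Python raises ValueError on the negative shift).
def pvScanA : List Char → Nat → Option Nat
  | [], mask => some mask
  | c :: cs, mask =>
    let bit := 1 <<< (c.toNat - 97)
    if mask &&& bit ≠ 0 then none else pvScanA cs (mask ||| bit)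

-- the filtering loop: A's parallel lists 'masks'/'lengths' are kept as one list of pairs
def pvMasksA (arr : List String) : List (Nat × Int) :=
  arr.foldl (fun acc s =>
    match pvScanA s.toList 0 with
    | some m => acc ++ [(m, (pvPc m : Int))]
    | none => acc) []

-- the 'remaining_max_length' pruning loop (accumulator starts at current_length)
def pvRem (ms : List (Nat × Int)) (cur : Nat) (clen : Int) : Int :=
  ms.foldl (fun a p => if cur &&& p.1 = 0 then a + p.2 else a) clen

-- optimized_backtrack; the mutable cell max_len[0] is threaded as 'best' (the suffix of masks stands for the index)
mutual
def pvBack (ms : List (Nat × Int)) (cur : Nat) (clen : Int) (best : Int) : Int :=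
  let best1 := if clen > best then clen else best
  let rem := pvRem ms cur clen
  if rem ≤ best1 then best1
  else pvLoop ms cur clen best1
termination_by (ms.length, 1)

def pvLoop : List (Nat × Int) → Nat → Int → Int → Int
  | [], _, _, best => best
  | p :: rest, cur, clen, best =>
    if cur &&& p.1 = 0 then
      pvLoop rest cur clen (pvBack rest (cur ||| p.1) (clen + p.2) best)
    else pvLoop rest cur clen best
termination_by ms _ _ _ => (ms.length, 0)
end

def max_length3 (arr : List String) : Int := pvBack (pvMasksA arr) 0 0 0

-- ===== PORT B =====

-- m |= 1 << (ord(c) - 97), over the whole string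
def pvMaskB (s : List Char) : Nat :=
  s.foldl (fun m c => m ||| (1 <<< (c.toNat - 97))) 0

-- reach |= {r | m for r in reach if r & m == 0}
def pvStepB (reach : PySem.Set Nat) (m : Nat) : PySem.Set Nat :=
  PySem.Set.union reach ((reach.filter (fun r => r &&& m == 0)).map (fun r => r ||| m))

def max_length3_alt (arr : List String) : Int :=
  let reach := arr.foldl (fun reach s =>
    let m := pvMaskB s.toList
    if pvPc m ≠ s.toList.length then reach
    else pvStepB reach m) (PySem.Set.ofList [0])
  -- max(bin(r).count("1") for r in reach): max over a set of ints, order-independent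
  match PySem.List.max? (reach.map (fun r => (pvPc r : Int))) (fun x => x) with
  | some v => v
  | none => 0   -- unreachable: reach always contains 0's descendants (Python max never sees an empty set here)

-- ===== PRECONDITION & SPEC =====
-- Pre_ excludes inputs containing a character below 'a': there Python computes 1 << (negative) and raises
-- ValueError (A only when its scan reaches such a character before a repeated bit, B always).
def Pre_max_length3 (arr : List String) : Prop :=
  (arr.all (fun s => s.toList.all (fun c => 97 ≤ c.toNat))) = true
instance (arr : List String) : Decidable (Pre_max_length3 arr) := by unfold Pre_max_length3; infer_instance

def pvWitness_max_length3 : List String := ["un", "iq", "ue"]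

def Spec_max_length3 (arr : List String) (out : Int) : Prop := out = max_length3_alt arr
instance (arr : List String) (out : Int) : Decidable (Spec_max_length3 arr out) := by unfold Spec_max_length3; infer_instance

-- ===== CLAIM (what is proved, stated in full; the proofs are below) =====
def Claim_equal_max_length3 : Prop := ∀ (arr : List String), Dom_max_length3 arr → Pre_max_length3 arr → Spec_max_length3 arr (max_length3 arr)

-- ===== LEMMAS AND PROOFS =====

-- The common specification both ports are reduced to: the best total popcount obtainable from the
-- (mask, length) list by picking pairwise-disjoint masks also disjoint from 'cur'.
def bestF : List (Nat × Int) → Nat → Int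
  | [], _ => 0
  | p :: rest, cur =>
    if cur &&& p.1 = 0 then max (p.2 + bestF rest (cur ||| p.1)) (bestF rest cur)
    else bestF rest cur

theorem bestF_nonneg (ms : List (Nat × Int)) (cur : Nat)
    (h : ∀ p ∈ ms, 0 ≤ p.2) : 0 ≤ bestF ms cur := by
  induction ms generalizing cur with
  | nil => simp [bestF]
  | cons p rest ih =>
    have hp := h p (List.mem_cons_self ..)
    have ht : ∀ q ∈ rest, 0 ≤ q.2 := fun q hq => h q (List.mem_cons_of_mem _ hq)
    simp only [bestF]
    split
    · have := ih (cur ||| p.1) ht; have := ih cur ht; omega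
    · exact ih cur ht

-- ---- popcount / single-bit facts ----

theorem pvPc_zero : pvPc 0 = 0 := by decide

theorem pvPc_rec (n : Nat) (h : 0 < n) : pvPc n = n % 2 + pvPc (n / 2) :=
  PySem.Int.bitCount_natCast h

theorem parity_or (a b : Nat) (h : a &&& b = 0) : (a ||| b) % 2 = a % 2 + b % 2 := by
  have hp : a % 2 = 1 → b % 2 = 0 := by
    have := congrArg (fun n => n.testBit 0) h; simpa using this
  have g : ∀ n : Nat, n % 2 = if n.testBit 0 then 1 else 0 := by
    intro n; rcases Nat.mod_two_eq_zero_or_one n with h1|h1 <;> simp [Nat.testBit_zero, h1]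
  rw [g (a ||| b), g a, g b, Nat.testBit_or]
  simp only [Nat.testBit_zero]
  rcases Nat.mod_two_eq_zero_or_one a with h1|h1 <;> rcases Nat.mod_two_eq_zero_or_one b with h2|h2 <;>
    · simp [h1, h2]
      try omega

theorem pvPc_or (a : Nat) : ∀ b : Nat, a &&& b = 0 → pvPc (a ||| b) = pvPc a + pvPc b := by
  induction a using Nat.strong_induction_on with
  | _ a ih =>
    intro b h
    rcases Nat.eq_zero_or_pos a with ha|ha
    · subst ha; simp [pvPc_zero]
    rcases Nat.eq_zero_or_pos b with hb|hb
    · subst hb; simp [pvPc_zero]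
    have hab : 0 < a ||| b := lt_of_lt_of_le ha Nat.left_le_or
    have hdiv : (a / 2) &&& (b / 2) = 0 := by rw [← Nat.and_div_two, h]
    rw [pvPc_rec _ hab, Nat.or_div_two, parity_or a b h,
        ih (a / 2) (Nat.div_lt_self ha one_lt_two) (b / 2) hdiv,
        pvPc_rec a ha, pvPc_rec b hb]
    omega

theorem pvPc_shift (k : Nat) : pvPc (1 <<< k) = 1 := by
  induction k with
  | zero => decide
  | succ k ih =>
    have h1 : (1 : Nat) <<< (k + 1) = (1 <<< k) * 2 := by
      rw [Nat.one_shiftLeft, Nat.one_shiftLeft, Nat.pow_succ]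
    have hp : 0 < (1 : Nat) <<< k := Nat.pos_of_neZero _
    rw [h1, pvPc_rec _ (by omega)]
    simp [Nat.mul_div_cancel _ (by norm_num : (0:Nat) < 2), ih]

theorem pvPc_or_bit (m k : Nat) (h : m &&& (1 <<< k) = 0) :
    pvPc (m ||| (1 <<< k)) = pvPc m + 1 := by
  rw [pvPc_or m _ h, pvPc_shift]

theorem bit_absorb (m k : Nat) (h : m &&& (1 <<< k) ≠ 0) : m ||| (1 <<< k) = m := by
  rw [Nat.one_shiftLeft] at *
  have ht : m.testBit k = true := by
    by_contra hc
    rw [Nat.and_two_pow] at h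
    simp [Bool.not_eq_true] at hc
    rw [hc] at h; simp at h
  apply Nat.eq_of_testBit_eq
  intro i
  simp only [Nat.testBit_or, Nat.testBit_two_pow]
  by_cases hk : k = i
  · subst hk; simp [ht]
  · simp [hk]

theorem and_zero_of_or_and_zero {a b c : Nat} (h : (a ||| b) &&& c = 0) :
    a &&& c = 0 ∧ b &&& c = 0 := by
  have h1 : (a &&& c) ||| (b &&& c) = 0 := by rw [← Nat.and_or_distrib_right]; exact h
  have h2 : a &&& c ≤ (a &&& c) ||| (b &&& c) := Nat.left_le_or
  have h3 : b &&& c ≤ (a &&& c) ||| (b &&& c) := Nat.right_le_or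
  omega

-- ---- A's per-string scan vs B's whole-string mask ----

def chFold (mask : Nat) (cs : List Char) : Nat :=
  cs.foldl (fun m c => m ||| (1 <<< (c.toNat - 97))) mask

theorem pvMaskB_eq (cs : List Char) : pvMaskB cs = chFold 0 cs := rfl

theorem chFold_cons (mask : Nat) (c : Char) (cs : List Char) :
    chFold mask (c :: cs) = chFold (mask ||| (1 <<< (c.toNat - 97))) cs := rfl

theorem scan_some_mask (cs : List Char) : ∀ mask m, pvScanA cs mask = some m → m = chFold mask cs := by
  induction cs with
  | nil => intro mask m h; simp [pvScanA] at h; simp [chFold, h]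
  | cons c cs ih =>
    intro mask m h
    simp only [pvScanA] at h
    split at h
    · exact absurd h (by simp)
    · rw [chFold_cons]; exact ih _ _ h

theorem scan_some_pc (cs : List Char) : ∀ mask m, pvScanA cs mask = some m →
    pvPc m = pvPc mask + cs.length := by
  induction cs with
  | nil => intro mask m h; simp [pvScanA] at h; simp [h]
  | cons c cs ih =>
    intro mask m h
    simp only [pvScanA] at h
    split at h
    · exact absurd h (by simp)
    · rename_i hbit
      simp only [ne_eq, Decidable.not_not] at hbit
      have := ih _ _ h
      rw [this, pvPc_or_bit _ _ hbit]
      simp; omega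

theorem chFold_pc_le (cs : List Char) : ∀ mask, pvPc (chFold mask cs) ≤ pvPc mask + cs.length := by
  induction cs with
  | nil => intro mask; simp [chFold]
  | cons c cs ih =>
    intro mask
    rw [chFold_cons]
    by_cases hbit : mask &&& (1 <<< (c.toNat - 97)) = 0
    · have := ih (mask ||| (1 <<< (c.toNat - 97)))
      rw [pvPc_or_bit _ _ hbit] at this
      simp; omega
    · rw [bit_absorb _ _ hbit]
      have := ih mask
      simp; omega

theorem scan_none_pc (cs : List Char) : ∀ mask, pvScanA cs mask = none →
    pvPc (chFold mask cs) < pvPc mask + cs.length := by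
  induction cs with
  | nil => intro mask h; simp [pvScanA] at h
  | cons c cs ih =>
    intro mask h
    simp only [pvScanA] at h
    rw [chFold_cons]
    split at h
    · rename_i hbit
      simp only [ne_eq] at hbit
      rw [bit_absorb _ _ hbit]
      have := chFold_pc_le cs mask
      simp; omega
    · rename_i hbit
      simp only [ne_eq, Decidable.not_not] at hbit
      have := ih _ h
      rw [pvPc_or_bit _ _ hbit] at this
      simp; omega

-- scan at 0 succeeds exactly when B's popcount test passes, and then yields B's mask
theorem scan_some_iff (cs : List Char) (m : Nat) (h : pvScanA cs 0 = some m) :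
    m = pvMaskB cs ∧ pvPc (pvMaskB cs) = cs.length := by
  have h1 := scan_some_mask cs 0 m h
  have h2 := scan_some_pc cs 0 m h
  rw [pvMaskB_eq]
  refine ⟨h1, ?_⟩
  rw [← h1, h2, pvPc_zero]; omega

theorem scan_none_iff (cs : List Char) (h : pvScanA cs 0 = none) :
    pvPc (pvMaskB cs) ≠ cs.length := by
  have := scan_none_pc cs 0 h
  rw [pvMaskB_eq, pvPc_zero] at *
  omega

-- ---- the filtered (mask, length) list ----

def gMask (s : String) : Option (Nat × Int) :=
  (pvScanA s.toList 0).map (fun m => (m, (pvPc m : Int)))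

theorem pvMasksA_eq (arr : List String) : pvMasksA arr = arr.filterMap gMask := by
  have key : ∀ (l : List String) (acc : List (Nat × Int)),
      l.foldl (fun acc s =>
        match pvScanA s.toList 0 with
        | some m => acc ++ [(m, (pvPc m : Int))]
        | none => acc) acc = acc ++ l.filterMap gMask := by
    intro l
    induction l with
    | nil => intro acc; simp
    | cons s l ih =>
      intro acc
      cases hs : pvScanA s.toList 0 with
      | none =>
        have hf : gMask s = none := by simp [gMask, hs]
        simp only [List.foldl_cons, List.filterMap_cons, hs, hf]
        exact ih acc
      | some m =>
        have hf : gMask s = some (m, (pvPc m : Int)) := by simp [gMask, hs]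
        simp only [List.foldl_cons, List.filterMap_cons, hs, hf]
        rw [ih]
        simp
  exact key arr []

theorem mem_pvMasksA {arr : List String} {p : Nat × Int} (h : p ∈ pvMasksA arr) :
    p.2 = (pvPc p.1 : Int) := by
  rw [pvMasksA_eq] at h
  obtain ⟨s, _, hg⟩ := List.mem_filterMap.mp h
  unfold gMask at hg
  cases hs : pvScanA s.toList 0 with
  | none => rw [hs] at hg; simp at hg
  | some m => rw [hs] at hg; simp at hg; rw [← hg]

theorem nonneg_pvMasksA {arr : List String} {p : Nat × Int} (h : p ∈ pvMasksA arr) : 0 ≤ p.2 := by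
  rw [mem_pvMasksA h]; positivity

-- ---- A's backtracking equals bestF ----

theorem pvRem_cons (p : Nat × Int) (rest : List (Nat × Int)) (cur : Nat) (clen : Int) :
    pvRem (p :: rest) cur clen = pvRem rest cur (if cur &&& p.1 = 0 then clen + p.2 else clen) := by
  simp only [pvRem, List.foldl_cons]

theorem pvRem_clen_mono (ms : List (Nat × Int)) : ∀ (cur : Nat) (c c' : Int), c ≤ c' →
    pvRem ms cur c ≤ pvRem ms cur c' := by
  induction ms with
  | nil => intro cur c c' h; simpa [pvRem] using h
  | cons p rest ih =>
    intro cur c c' h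
    rw [pvRem_cons, pvRem_cons]
    apply ih
    split <;> omega

theorem pvRem_cur_mono (ms : List (Nat × Int)) : ∀ (cur cur' : Nat) (clen : Int),
    (∀ x, cur' &&& x = 0 → cur &&& x = 0) → (∀ p ∈ ms, 0 ≤ p.2) →
    pvRem ms cur' clen ≤ pvRem ms cur clen := by
  induction ms with
  | nil => intro _ _ _ _ _; simp [pvRem]
  | cons p rest ih =>
    intro cur cur' clen himp hnn
    have hnr : ∀ q ∈ rest, 0 ≤ q.2 := fun q hq => hnn q (List.mem_cons_of_mem _ hq)
    have hp := hnn p (List.mem_cons_self ..)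
    rw [pvRem_cons, pvRem_cons]
    calc pvRem rest cur' (if cur' &&& p.1 = 0 then clen + p.2 else clen)
        ≤ pvRem rest cur (if cur' &&& p.1 = 0 then clen + p.2 else clen) := ih _ _ _ himp hnr
      _ ≤ pvRem rest cur (if cur &&& p.1 = 0 then clen + p.2 else clen) := by
          apply pvRem_clen_mono
          split
          · split
            · omega
            · rename_i h1 h2; exact absurd (himp _ h1) h2
          · split
            · omega
            · omega

theorem rem_ge (ms : List (Nat × Int)) : ∀ (cur : Nat) (clen : Int), (∀ p ∈ ms, 0 ≤ p.2) →
    clen + bestF ms cur ≤ pvRem ms cur clen := by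
  induction ms with
  | nil => intro cur clen _; simp [pvRem, bestF]
  | cons p rest ih =>
    intro cur clen hnn
    have hnr : ∀ q ∈ rest, 0 ≤ q.2 := fun q hq => hnn q (List.mem_cons_of_mem _ hq)
    have hp := hnn p (List.mem_cons_self ..)
    rw [pvRem_cons]
    by_cases hd : cur &&& p.1 = 0
    · simp only [bestF, if_pos hd]
      have h1 : clen + p.2 + bestF rest (cur ||| p.1) ≤ pvRem rest (cur ||| p.1) (clen + p.2) := ih _ _ hnr
      have h2 : pvRem rest (cur ||| p.1) (clen + p.2) ≤ pvRem rest cur (clen + p.2) := by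
        apply pvRem_cur_mono _ _ _ _ (fun x hx => (and_zero_of_or_and_zero hx).1) hnr
      have h3 : clen + bestF rest cur ≤ pvRem rest cur clen := ih _ _ hnr
      have h4 : pvRem rest cur clen ≤ pvRem rest cur (clen + p.2) := pvRem_clen_mono _ _ _ _ (by omega)
      omega
    · simp only [bestF, if_neg hd]
      exact ih _ _ hnr

theorem back_eq (ms : List (Nat × Int)) (hnn : ∀ p ∈ ms, 0 ≤ p.2)
    (hloop : ∀ (cur : Nat) (clen best : Int), clen ≤ best →
      pvLoop ms cur clen best = max best (clen + bestF ms cur))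
    (cur : Nat) (clen best : Int) :
    pvBack ms cur clen best = max best (clen + bestF ms cur) := by
  have h0 : 0 ≤ bestF ms cur := bestF_nonneg ms cur hnn
  have hrem : clen + bestF ms cur ≤ pvRem ms cur clen := rem_ge ms cur clen hnn
  simp only [pvBack]
  split_ifs with hb hr hr
  · omega
  · rw [hloop cur clen clen le_rfl]; omega
  · omega
  · rw [hloop cur clen best (by omega)]

theorem loop_eq (ms : List (Nat × Int)) (hnn : ∀ p ∈ ms, 0 ≤ p.2) :
    ∀ (cur : Nat) (clen best : Int), clen ≤ best →
      pvLoop ms cur clen best = max best (clen + bestF ms cur) := by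
  induction ms with
  | nil => intro cur clen best h; simp only [pvLoop, bestF]; omega
  | cons p rest ih =>
    intro cur clen best h
    have hnr : ∀ q ∈ rest, 0 ≤ q.2 := fun q hq => hnn q (List.mem_cons_of_mem _ hq)
    have hp := hnn p (List.mem_cons_self ..)
    have h0r : 0 ≤ bestF rest cur := bestF_nonneg rest cur hnr
    have h0o : 0 ≤ bestF rest (cur ||| p.1) := bestF_nonneg rest (cur ||| p.1) hnr
    by_cases hd : cur &&& p.1 = 0
    · simp only [pvLoop, if_pos hd]
      rw [back_eq rest hnr (ih hnr) (cur ||| p.1) (clen + p.2) best]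
      rw [ih hnr cur clen _ (by omega)]
      simp only [bestF, if_pos hd]
      omega
    · simp only [pvLoop, if_neg hd]
      rw [ih hnr cur clen best h]
      simp only [bestF, if_neg hd]

theorem thmA (arr : List String) : max_length3 arr = bestF (pvMasksA arr) 0 := by
  unfold max_length3
  have hnn : ∀ p ∈ pvMasksA arr, 0 ≤ p.2 := fun p hp => nonneg_pvMasksA hp
  rw [back_eq _ hnn (loop_eq _ hnn) 0 0 0]
  have := bestF_nonneg (pvMasksA arr) 0 hnn
  omega

-- ---- B's reachable-mask DP equals bestF ----

theorem mem_stepB (R : PySem.Set Nat) (m r' : Nat) :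
    r' ∈ pvStepB R m ↔ r' ∈ R ∨ ∃ r ∈ R, r &&& m = 0 ∧ r' = r ||| m := by
  unfold pvStepB
  rw [PySem.Set.mem_union]
  simp only [List.mem_map, List.mem_filter, beq_iff_eq]
  constructor
  · rintro (h | ⟨r, ⟨hr, hd⟩, rfl⟩)
    · exact Or.inl h
    · exact Or.inr ⟨r, hr, hd, rfl⟩
  · rintro (h | ⟨r, hr, hd, rfl⟩)
    · exact Or.inl h
    · exact Or.inr ⟨r, ⟨hr, hd⟩, rfl⟩

def foldReach (R : List Nat) (ms : List (Nat × Int)) : List Nat :=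
  ms.foldl (fun R p => pvStepB R p.1) R

theorem foldReach_cons (R : List Nat) (p : Nat × Int) (rest : List (Nat × Int)) :
    foldReach R (p :: rest) = foldReach (pvStepB R p.1) rest := rfl

theorem bestF_cons_ge (p : Nat × Int) (rest : List (Nat × Int)) (cur : Nat) :
    bestF rest cur ≤ bestF (p :: rest) cur := by
  simp only [bestF]
  split
  · exact le_max_right _ _
  · exact le_refl _

theorem bestF_cons_pick {p : Nat × Int} (rest : List (Nat × Int)) {cur : Nat}
    (h : cur &&& p.1 = 0) : p.2 + bestF rest (cur ||| p.1) ≤ bestF (p :: rest) cur := by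
  simp only [bestF, if_pos h]
  exact le_max_left _ _

theorem reach_up (ms : List (Nat × Int)) (hpc : ∀ p ∈ ms, p.2 = (pvPc p.1 : Int)) :
    ∀ (R : List Nat) (r' : Nat), r' ∈ foldReach R ms →
      ∃ r ∈ R, (pvPc r' : Int) ≤ pvPc r + bestF ms r := by
  induction ms with
  | nil =>
    intro R r' h
    exact ⟨r', by simpa [foldReach] using h, by simp [bestF]⟩
  | cons p rest ih =>
    intro R r' h
    rw [foldReach_cons] at h
    have hpr : ∀ q ∈ rest, q.2 = (pvPc q.1 : Int) := fun q hq => hpc q (List.mem_cons_of_mem _ hq)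
    obtain ⟨r, hr, hle⟩ := ih hpr (pvStepB R p.1) r' h
    rcases (mem_stepB R p.1 r).mp hr with hrR | ⟨r0, hr0, hd, rfl⟩
    · exact ⟨r, hrR, le_trans hle (by have := bestF_cons_ge p rest r; omega)⟩
    · refine ⟨r0, hr0, ?_⟩
      have hor : pvPc (r0 ||| p.1) = pvPc r0 + pvPc p.1 := pvPc_or _ _ hd
      have hbf := bestF_cons_pick rest hd
      have hp2 := hpc p (List.mem_cons_self ..)
      rw [hor] at hle
      push_cast at *
      omega

theorem reach_down (ms : List (Nat × Int)) (hpc : ∀ p ∈ ms, p.2 = (pvPc p.1 : Int)) :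
    ∀ (R : List Nat) (r : Nat), r ∈ R →
      ∃ r' ∈ foldReach R ms, (pvPc r' : Int) = pvPc r + bestF ms r := by
  induction ms with
  | nil => intro R r h; exact ⟨r, h, by simp [bestF]⟩
  | cons p rest ih =>
    intro R r hr
    rw [foldReach_cons]
    have hpr : ∀ q ∈ rest, q.2 = (pvPc q.1 : Int) := fun q hq => hpc q (List.mem_cons_of_mem _ hq)
    have hrS : r ∈ pvStepB R p.1 := (mem_stepB R p.1 r).mpr (Or.inl hr)
    by_cases hd : r &&& p.1 = 0
    · rcases le_total (p.2 + bestF rest (r ||| p.1)) (bestF rest r) with hmax | hmax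
      · obtain ⟨r', h1, h2⟩ := ih hpr (pvStepB R p.1) r hrS
        refine ⟨r', h1, ?_⟩
        rw [h2]
        simp only [bestF, if_pos hd]
        omega
      · have hrS2 : r ||| p.1 ∈ pvStepB R p.1 :=
          (mem_stepB R p.1 _).mpr (Or.inr ⟨r, hr, hd, rfl⟩)
        obtain ⟨r', h1, h2⟩ := ih hpr (pvStepB R p.1) _ hrS2
        refine ⟨r', h1, ?_⟩
        rw [h2, pvPc_or _ _ hd]
        have hp2 := hpc p (List.mem_cons_self ..)
        simp only [bestF, if_pos hd]
        push_cast at *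
        omega
    · obtain ⟨r', h1, h2⟩ := ih hpr (pvStepB R p.1) r hrS
      refine ⟨r', h1, ?_⟩
      rw [h2]
      simp only [bestF, if_neg hd]

theorem altFold_eq (arr : List String) : ∀ R : PySem.Set Nat,
    arr.foldl (fun reach s =>
      if pvPc (pvMaskB s.toList) ≠ s.toList.length then reach
      else pvStepB reach (pvMaskB s.toList)) R = foldReach R (pvMasksA arr) := by
  rw [pvMasksA_eq]
  induction arr with
  | nil => intro R; simp [foldReach]
  | cons s arr ih =>
    intro R
    cases hs : pvScanA s.toList 0 with
    | none =>
      have hf : gMask s = none := by simp [gMask, hs]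
      have hc : pvPc (pvMaskB s.toList) ≠ s.toList.length := scan_none_iff _ hs
      simp only [List.foldl_cons, List.filterMap_cons, hf, if_pos hc]
      exact ih R
    | some m =>
      obtain ⟨hm, hpc⟩ := scan_some_iff _ m hs
      have hf : gMask s = some (m, (pvPc m : Int)) := by simp [gMask, hs]
      have hc : ¬ (pvPc (pvMaskB s.toList) ≠ s.toList.length) := by
        rw [← hm] at hpc ⊢; simpa using hpc
      simp only [List.foldl_cons, List.filterMap_cons, hf, if_neg hc]
      rw [ih, foldReach_cons, hm]

theorem thmB (arr : List String) : max_length3_alt arr = bestF (pvMasksA arr) 0 := by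
  have hz : max_length3_alt arr =
      (match PySem.List.max? ((foldReach [0] (pvMasksA arr)).map (fun r => (pvPc r : Int)))
          (fun x => x) with
        | some v => v
        | none => 0) := by
    unfold max_length3_alt
    rw [show PySem.Set.ofList [0] = ([0] : List Nat) from rfl, altFold_eq arr [0]]
  rw [hz]
  have hpc : ∀ p ∈ pvMasksA arr, p.2 = (pvPc p.1 : Int) := fun p hp => mem_pvMasksA hp
  obtain ⟨rd, hrd, hpcd⟩ := reach_down (pvMasksA arr) hpc [0] 0 (by simp)
  cases hmax : PySem.List.max? ((foldReach [0] (pvMasksA arr)).map (fun r => (pvPc r : Int))) (fun x => x) with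
  | none =>
    rw [PySem.List.max?_eq_none_iff] at hmax
    rw [List.map_eq_nil_iff] at hmax
    rw [hmax] at hrd
    simp at hrd
  | some v =>
    show v = bestF (pvMasksA arr) 0
    have hv := PySem.List.max?_mem hmax
    obtain ⟨r', hr', hvr⟩ := List.mem_map.mp hv
    obtain ⟨r0, hr0, hle⟩ := reach_up (pvMasksA arr) hpc [0] r' hr'
    have hr00 : r0 = 0 := by simpa using hr0
    subst hr00
    have hge := PySem.List.max?_isMax hmax _ (List.mem_map_of_mem hrd)
    simp only at hge
    have hz : pvPc 0 = 0 := pvPc_zero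
    rw [hz] at hle hpcd
    omega

theorem max_length3_spec : Claim_equal_max_length3 := by
  intro arr _ _
  unfold Spec_max_length3
  rw [thmA, thmB]
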